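-- pv_equiv track=rewrite | github.com/DarthSayan/BaseChange | featuredTools.py | check_if_binary
-- ===== SOURCE A (Python) =====
-- def check_if_binary(num):
--     num = str(num)
--     flag = True
--     for i in num:
--         if i not in "0,1":
--             flag = False
--             break
--     return flag
-- ===== SOURCE B (Python) =====
-- import re
--
-- def check_if_binary(num):
--     return bool(re.fullmatch(r"[0,1]*", str(num)))
-- ===== Notes on version B (the rewrite author's own statement) =====
-- stated objective: idiomatic
-- what changed: Replaces the explicit for-loop with a mutable flag and break by a single regex full-match of str(num) against the allowed character class [0,1]*.
import Mathlib
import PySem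

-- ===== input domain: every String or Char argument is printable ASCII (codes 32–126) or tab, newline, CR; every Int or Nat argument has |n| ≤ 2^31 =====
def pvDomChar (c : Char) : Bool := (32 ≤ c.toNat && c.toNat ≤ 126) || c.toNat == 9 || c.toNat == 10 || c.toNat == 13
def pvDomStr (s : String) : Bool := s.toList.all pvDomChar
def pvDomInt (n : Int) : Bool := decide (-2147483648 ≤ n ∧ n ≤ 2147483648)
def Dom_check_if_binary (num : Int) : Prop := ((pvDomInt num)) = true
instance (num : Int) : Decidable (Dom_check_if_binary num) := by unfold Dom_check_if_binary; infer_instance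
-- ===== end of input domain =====

-- B replaces A's flag-and-break loop by a regex full-match of str(num) against [0,1]* (idiomatic; same cost).

-- ===== PORT A =====
-- the for-loop with flag and break: recursion that returns false and stops at the first char not in "0,1"
def checkIfBinaryLoop : List Char → Bool
  | [] => true
  | c :: rest =>
    if !(c == '0' || c == ',' || c == '1') then false
    else checkIfBinaryLoop rest

def check_if_binary (num : Int) : Bool :=
  checkIfBinaryLoop (PySem.Int.toStr num).toList

-- ===== PORT B =====
-- re.fullmatch(r"[0,1]*", s): every character of s matches the character class [0,1]
def check_if_binary_alt (num : Int) : Bool :=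
  (PySem.Int.toStr num).toList.all (fun c => c == '0' || c == ',' || c == '1')

-- ===== PRECONDITION & SPEC =====
def Spec_check_if_binary (num : Int) (out : Bool) : Prop := out = check_if_binary_alt num
instance (num : Int) (out : Bool) : Decidable (Spec_check_if_binary num out) := by unfold Spec_check_if_binary; infer_instance

-- ===== CLAIM (what is proved, stated in full; the proofs are below) =====
def Claim_equal_check_if_binary : Prop := ∀ (num : Int), Dom_check_if_binary num → Spec_check_if_binary num (check_if_binary num)

-- ===== LEMMAS AND PROOFS =====
theorem checkIfBinaryLoop_eq_all (l : List Char) :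
    checkIfBinaryLoop l = l.all (fun c => c == '0' || c == ',' || c == '1') := by
  induction l with
  | nil => rfl
  | cons c rest ih =>
    simp only [checkIfBinaryLoop, List.all_cons, ih]
    by_cases h : (c == '0' || c == ',' || c == '1') = true <;> simp [h]

-- ===== VERDICT (by name: the statement is the Claim_ definition above) =====
theorem check_if_binary_spec : Claim_equal_check_if_binary := by
  intro num _
  unfold Spec_check_if_binary check_if_binary check_if_binary_alt
  exact checkIfBinaryLoop_eq_all _
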